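-- pv_equiv track=rewrite | github.com/aliaksandr-klimovich/sandbox | util/signal_processing/reduce_data/reduce_with_info.py | reduce_with_info
-- ===== SOURCE A (Python) =====
-- from collections.abc import Iterator, Generator
--
-- def reduce_with_info(data: Iterator) -> Generator[tuple]:
--     """
--     Returns reduced data in `ReducedDataInfo` object (which contains information about reduced data).
--     Info objects consists of:
--     - index of first reduced element;
--     - value of first reduced element;
--     - reduced elements count.
--
--     Example:
--     >>> list(reduce_with_info([1, 2, 2, 3, 3, 3, 1]))
--     [(0, 1, 1), (1, 2, 2), (3, 3, 3), (6, 1, 1)]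
--
--     Note, implementation uses "next" value provision, i.e. yields info of the already reduced data while
--     new value from data is preserved for future yield.
--     """
--
--     # Create iterator over the data
--     iter_data = iter(data)
--
--     # Get first value, store it. Also check for empty data.
--     try:
--         previous_value = next(iter_data)
--     except StopIteration:
--         return
--
--     # Initialize variables for `for` cycle and for last reduced data info if any.
--     start_index = 0
--     current_index = 1
--
--     # Iterate over the rest of the data
--     for current_value in iter_data:
--         if current_value != previous_value:
--             length = current_index - start_index
--             yield start_index, previous_value, length
--             start_index = current_index
--             previous_value = current_value
--         current_index += 1
--
--     length = current_index - start_index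
--     yield start_index, previous_value, length
-- ===== SOURCE B (Python) =====
-- def reduce_with_info(data):
--     data = list(data)
--     n = len(data)
--     starts = [i for i in range(n) if i == 0 or data[i] != data[i - 1]]
--     bounds = starts + [n]
--     for s, e in zip(bounds, bounds[1:]):
--         yield s, data[s], e - s
-- ===== Notes on version B (the rewrite author's own statement) =====
-- stated objective: alternative
-- what changed: Replaced A's single-pass previous_value/start_index state machine with staged passes: first collect all run-boundary indices [i : data[i] != data[i-1]], then zip consecutive boundaries (plus the length sentinel) into (start, value, length) triples.
import Mathlib
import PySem

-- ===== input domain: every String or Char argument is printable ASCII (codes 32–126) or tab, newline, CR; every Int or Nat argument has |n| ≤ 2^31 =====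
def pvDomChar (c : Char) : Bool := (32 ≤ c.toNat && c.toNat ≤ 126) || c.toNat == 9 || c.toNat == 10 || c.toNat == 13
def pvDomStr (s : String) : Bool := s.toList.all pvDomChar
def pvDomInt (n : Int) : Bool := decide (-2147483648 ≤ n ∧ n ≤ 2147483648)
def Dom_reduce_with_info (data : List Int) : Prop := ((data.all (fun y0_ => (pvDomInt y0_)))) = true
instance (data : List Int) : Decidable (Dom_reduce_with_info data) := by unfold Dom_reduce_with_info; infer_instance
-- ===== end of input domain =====

-- B replaces A's element-by-element state machine with staged passes: collect the run-boundary
-- indices, then zip consecutive boundaries into triples (alternative decomposition, same cost).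
-- Both Pythons are generators; the equivalence is about the yielded sequence (the return value).

-- ===== PORT A =====
-- A's for-loop over the remaining elements, with state (previous_value, start_index, current_index).
def reduce_with_info_go (rest : List Int) (prev start cur : Int) : List (Int × Int × Int) :=
  match rest with
  | [] => [(start, prev, cur - start)]
  | c :: rs =>
    if c ≠ prev then
      (start, prev, cur - start) :: reduce_with_info_go rs c cur (cur + 1)
    else
      reduce_with_info_go rs prev start (cur + 1)

def reduce_with_info (data : List Int) : List (Int × Int × Int) :=
  match data with
  | [] => []
  | v :: rest => reduce_with_info_go rest v 0 1

-- ===== PORT B =====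
-- the boundary pass: [i for i in range(n) if i == 0 or data[i] != data[i-1]]
-- (indices produced by range(n) are valid, so data[i] is List.getD; i-1 is only
-- looked at under i ≠ 0, where Nat and Python subtraction agree)
def rwiStarts (data : List Int) : List Nat :=
  (List.range data.length).filter
    (fun i => i == 0 || data.getD i 0 != data.getD (i - 1) 0)

-- bounds = starts + [n]; zip(bounds, bounds[1:]) pairs consecutive boundaries
def reduce_with_info_alt (data : List Int) : List (Int × Int × Int) :=
  let bounds := rwiStarts data ++ [data.length]
  (bounds.zip bounds.tail).map
    (fun p => ((p.1 : Int), data.getD p.1 0, (p.2 : Int) - (p.1 : Int)))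

-- ===== PRECONDITION & SPEC =====
def Spec_reduce_with_info (data : List Int) (out : List (Int × Int × Int)) : Prop := out = reduce_with_info_alt data
instance (data : List Int) (out : List (Int × Int × Int)) : Decidable (Spec_reduce_with_info data out) := by unfold Spec_reduce_with_info; infer_instance

-- ===== CLAIM (what is proved, stated in full; the proofs are below) =====
def Claim_equal_reduce_with_info : Prop := ∀ (data : List Int), Dom_reduce_with_info data → Spec_reduce_with_info data (reduce_with_info data)

-- ===== LEMMAS AND PROOFS =====
-- Canonical run-at-a-time form C, used only as the middleman of the proof: A = C and B = C.
def rwiTakeRun (v : Int) : List Int → Int × List Int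
  | [] => (0, [])
  | x :: xs =>
    if x = v then
      let p := rwiTakeRun v xs
      (p.1 + 1, p.2)
    else (0, x :: xs)

theorem rwiTakeRun_len (v : Int) (xs : List Int) : (rwiTakeRun v xs).2.length ≤ xs.length := by
  induction xs with
  | nil => simp [rwiTakeRun]
  | cons x xs ih =>
    simp only [rwiTakeRun]
    split
    · exact Nat.le_trans ih (Nat.le_succ _)
    · simp

def rwiAltGo (idx : Int) (l : List Int) : List (Int × Int × Int) :=
  match l with
  | [] => []
  | v :: xs =>
    let p := rwiTakeRun v xs
    (idx, v, p.1 + 1) :: rwiAltGo (idx + (p.1 + 1)) p.2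
termination_by l.length
decreasing_by exact Nat.lt_succ_of_le (rwiTakeRun_len v xs)

-- A-side: A's loop state (prev, s, s+k) with k consumed elements of the current run.
theorem rwi_go_eq (xs : List Int) : ∀ (v s k n : Int) (r : List Int), rwiTakeRun v xs = (n, r) →
    reduce_with_info_go xs v s (s + k) = (s, v, k + n) :: rwiAltGo (s + k + n) r := by
  induction xs with
  | nil =>
    intro v s k n r h
    simp only [rwiTakeRun, Prod.mk.injEq] at h
    obtain ⟨rfl, rfl⟩ := h
    simp [reduce_with_info_go, rwiAltGo]
  | cons x xs ih =>
    intro v s k n r h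
    by_cases hv : x = v
    · subst hv
      rcases ht : rwiTakeRun x xs with ⟨m, r'⟩
      rw [show rwiTakeRun x (x :: xs) = (m + 1, r') by simp [rwiTakeRun, ht]] at h
      obtain ⟨rfl, rfl⟩ := Prod.mk.inj h
      rw [show reduce_with_info_go (x :: xs) x s (s + k) = reduce_with_info_go xs x s (s + k + 1) by
            simp [reduce_with_info_go]]
      rw [show s + k + 1 = s + (k + 1) by ring, ih x s (k + 1) m r' ht]
      rw [show k + 1 + m = k + (m + 1) by ring, show s + (k + 1) + m = s + k + (m + 1) by ring]
    · rw [show rwiTakeRun v (x :: xs) = (0, x :: xs) by simp [rwiTakeRun, hv]] at h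
      obtain ⟨rfl, rfl⟩ := Prod.mk.inj h
      rw [show k + (0 : Int) = k by ring, show s + k + (0 : Int) = s + k by ring]
      rw [show reduce_with_info_go (x :: xs) v s (s + k)
            = (s, v, s + k - s) :: reduce_with_info_go xs x (s + k) (s + k + 1) by
            simp [reduce_with_info_go, hv]]
      rcases ht : rwiTakeRun x xs with ⟨m, r'⟩
      rw [show s + k + 1 = (s + k) + 1 by ring, ih x (s + k) 1 m r' ht]
      rw [show rwiAltGo (s + k) (x :: xs)
            = (s + k, x, m + 1) :: rwiAltGo (s + k + (m + 1)) r' by simp [rwiAltGo, ht]]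
      rw [show s + k - s = k by ring, show 1 + m = m + 1 by ring,
          show s + k + 1 + m = s + k + (m + 1) by ring]

theorem rwi_A_eq_C (data : List Int) : reduce_with_info data = rwiAltGo 0 data := by
  match data with
  | [] => simp [reduce_with_info, rwiAltGo]
  | v :: rest =>
    simp only [reduce_with_info]
    rcases ht : rwiTakeRun v rest with ⟨n, r⟩
    rw [show (1 : Int) = 0 + 1 by ring, rwi_go_eq rest v 0 1 n r ht]
    rw [show rwiAltGo 0 (v :: rest) = (0, v, n + 1) :: rwiAltGo (0 + (n + 1)) r by
          simp [rwiAltGo, ht]]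
    rw [show (1 : Int) + n = n + 1 by ring, show (0 : Int) + 1 + n = 0 + (n + 1) by ring]

-- rwiTakeRun on an explicit run
theorem rwiTakeRun_run (v : Int) (k : Nat) (d : List Int)
    (hd : ∀ x ∈ d.head?, x ≠ v) :
    rwiTakeRun v (List.replicate k v ++ d) = ((k : Int), d) := by
  induction k with
  | zero =>
    cases d with
    | nil => simp [rwiTakeRun]
    | cons x xs =>
      have hx : x ≠ v := hd x (by simp)
      simp [rwiTakeRun, hx]
  | succ k ih =>
    simp [List.replicate_succ, rwiTakeRun, ih]

-- shift lemma for C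
theorem rwiAltGo_shift (l : List Int) : ∀ (a i : Int),
    rwiAltGo (i + a) l = (rwiAltGo i l).map (fun p => (p.1 + a, p.2)) := by
  induction hl : l.length using Nat.strong_induction_on generalizing l with
  | _ n ih =>
    intro a i
    cases l with
    | nil => simp [rwiAltGo]
    | cons v xs =>
      rcases ht : rwiTakeRun v xs with ⟨m, r⟩
      have hr : r.length < n := by
        have h2 := rwiTakeRun_len v xs
        rw [ht] at h2
        simp only at h2
        simp only [List.length_cons] at hl
        omega
      rw [show rwiAltGo (i + a) (v :: xs)
            = (i + a, v, m + 1) :: rwiAltGo (i + a + (m + 1)) r by simp [rwiAltGo, ht]]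
      rw [show rwiAltGo i (v :: xs)
            = (i, v, m + 1) :: rwiAltGo (i + (m + 1)) r by simp [rwiAltGo, ht]]
      rw [show i + a + (m + 1) = (i + (m + 1)) + a by ring,
          ih r.length hr r rfl a (i + (m + 1))]
      simp

-- getD of the run prefix
theorem rwi_getD_left (v : Int) (m : Nat) (d : List Int) (i : Nat) (hi : i < m) :
    (List.replicate m v ++ d).getD i 0 = v := by
  rw [List.getD_eq_getElem?_getD,
      List.getElem?_append_left (by simpa using hi),
      List.getElem?_replicate, if_pos hi]
  rfl

theorem rwi_getD_right (v : Int) (m : Nat) (d : List Int) (j : Nat) :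
    (List.replicate m v ++ d).getD (m + j) 0 = d.getD j 0 := by
  rw [List.getD_eq_getElem?_getD,
      List.getElem?_append_right (by simp)]
  simp [List.getD_eq_getElem?_getD]

-- boundary pass on a run prefix
theorem rwiStarts_run (v : Int) (m : Nat) (d : List Int) (hm : 1 ≤ m)
    (hd : ∀ x ∈ d.head?, x ≠ v) :
    rwiStarts (List.replicate m v ++ d) = 0 :: (rwiStarts d).map (fun i => m + i) := by
  obtain ⟨k, rfl⟩ : ∃ k, m = k + 1 := ⟨m - 1, by omega⟩
  set D : List Int := List.replicate (k + 1) v ++ d with hD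
  have hlen : D.length = (k + 1) + d.length := by simp [hD]
  set p : Nat → Bool := fun i => i == 0 || D.getD i 0 != D.getD (i - 1) 0 with hp
  set q : Nat → Bool := fun j => j == 0 || d.getD j 0 != d.getD (j - 1) 0 with hq
  have hsplit : rwiStarts D
      = List.filter p (List.range (k + 1)) ++ List.filter p ((List.range d.length).map (fun x => (k+1) + x)) := by
    rw [rwiStarts, hlen, List.range_add, List.filter_append]
  have h1 : List.filter p (List.range (k + 1)) = [0] := by
    rw [List.range_succ_eq_map, List.filter_cons_of_pos (by simp [hp])]
    have : List.filter p (List.map Nat.succ (List.range k)) = [] := by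
      rw [List.filter_eq_nil_iff]
      intro a ha
      obtain ⟨j, hj, rfl⟩ := by simpa using ha
      simp only [hp, hD]
      rw [rwi_getD_left v (k+1) d (j+1) (by omega),
          show j + 1 - 1 = j from rfl,
          rwi_getD_left v (k+1) d j (by omega)]
      simp
    rw [this]
  have h2 : List.filter p ((List.range d.length).map (fun x => (k+1) + x))
      = (rwiStarts d).map (fun i => (k+1) + i) := by
    rw [List.filter_map, rwiStarts]
    congr 1
    apply List.filter_congr
    intro j hj
    have hjlen : j < d.length := by simpa using hj
    simp only [Function.comp, hp]
    have e1 : D.getD ((k+1) + j) 0 = d.getD j 0 := by rw [hD, rwi_getD_right]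
    cases j with
    | zero =>
      cases d with
      | nil => simp at hjlen
      | cons x t =>
        have hx : x ≠ v := hd x (by simp)
        have e2 : D.getD ((k+1) + 0 - 1) 0 = v := by
          rw [show (k+1) + 0 - 1 = k from rfl, hD, rwi_getD_left v (k+1) (x::t) k (by omega)]
        simp only [e1, e2]
        simp [hx]
    | succ i =>
      have e2 : D.getD ((k+1) + (i+1) - 1) 0 = d.getD i 0 := by
        rw [show (k+1) + (i+1) - 1 = (k+1) + i by omega, hD, rwi_getD_right]
      simp only [e1, e2]
      simp
  rw [hsplit, h1, h2]
  rfl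

-- head of the boundary list on nonempty input is 0
theorem rwiStarts_cons (x : Int) (t : List Int) :
    ∃ rest, rwiStarts (x :: t) = 0 :: rest := by
  refine ⟨List.filter (fun i => i == 0 || (x :: t).getD i 0 != (x :: t).getD (i - 1) 0)
      ((List.range t.length).map Nat.succ), ?_⟩
  rw [rwiStarts, List.length_cons, List.range_succ_eq_map,
      List.filter_cons_of_pos (by simp)]

-- B on a run prefix
theorem rwi_alt_run (v : Int) (m : Nat) (d : List Int) (hm : 1 ≤ m)
    (hd : ∀ x ∈ d.head?, x ≠ v) :
    reduce_with_info_alt (List.replicate m v ++ d)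
      = (0, v, (m : Int)) :: (reduce_with_info_alt d).map
          (fun p => (p.1 + (m : Int), p.2.1, p.2.2)) := by
  obtain ⟨bt, hbt⟩ : ∃ bt, rwiStarts d ++ [d.length] = 0 :: bt := by
    cases d with
    | nil => exact ⟨[], by simp [rwiStarts]⟩
    | cons x t =>
      obtain ⟨rest, hres⟩ := rwiStarts_cons x t
      exact ⟨rest ++ [(x :: t).length], by rw [hres]; rfl⟩
  have hbounds : rwiStarts (List.replicate m v ++ d) ++ [(List.replicate m v ++ d).length]
      = 0 :: (rwiStarts d ++ [d.length]).map (fun i => m + i) := by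
    rw [rwiStarts_run v m d hm hd, show (List.replicate m v ++ d).length = m + d.length by simp,
        List.map_append]
    rfl
  simp only [reduce_with_info_alt]
  rw [hbounds, hbt]
  have hz : (0 :: List.map (fun i => m + i) (0 :: bt)).zip
        ((0 :: List.map (fun i => m + i) (0 :: bt)).tail)
      = (0, m + 0) :: List.map (Prod.map (fun i => m + i) (fun i => m + i)) ((0 :: bt).zip bt) := by
    rw [List.tail_cons,
        show List.map (fun i => m + i) (0 :: bt)
          = (m + 0) :: List.map (fun i => m + i) bt from rfl,
        List.zip_cons_cons]
    congr 1
    rw [show ((m + 0) :: List.map (fun i => m + i) bt)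
          = List.map (fun i => m + i) (0 :: bt) from rfl,
        List.zip_map]
  rw [hz, List.map_cons, List.map_map]
  congr 1
  · -- head triple
    have h0 : (List.replicate m v ++ d).getD 0 0 = v := rwi_getD_left v m d 0 (by omega)
    simp only [List.getD_eq_getElem?_getD] at h0
    simp [h0]
  · -- tail triples
    simp only [List.tail_cons, List.map_map]
    apply List.map_congr_left
    intro p _
    have hg := rwi_getD_right v m d p.1
    simp only [Function.comp, Prod.map, hg]
    refine Prod.ext ?_ (Prod.ext ?_ ?_)
    · simp; ring
    · rfl
    · simp

theorem rwi_B_eq_C (data : List Int) : reduce_with_info_alt data = rwiAltGo 0 data := by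
  induction hl : data.length using Nat.strong_induction_on generalizing data with
  | _ n ih =>
    cases data with
    | nil => simp [reduce_with_info_alt, rwiStarts, rwiAltGo]
    | cons v xs =>
      set t := xs.takeWhile (fun x => x == v) with htw
      set d := xs.dropWhile (fun x => x == v) with hdw
      have ht : t = List.replicate t.length v := by
        apply List.eq_replicate_of_mem
        intro b hb
        have := List.mem_takeWhile_imp (htw ▸ hb)
        simpa using this
      have hsplit : v :: xs = List.replicate (t.length + 1) v ++ d := by
        rw [List.replicate_succ]
        simp only [List.cons_append, List.cons.injEq]
        refine ⟨trivial, ?_⟩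
        rw [← List.takeWhile_append_dropWhile (p := fun x => x == v) (l := xs)]
        rw [← htw, ← hdw, ← ht]
      have hd : ∀ x ∈ d.head?, x ≠ v := by
        intro x hx
        have := List.head?_dropWhile_not (fun x => x == v) xs
        rw [← hdw] at this
        cases hh : d.head? with
        | none => simp [hh] at hx
        | some y =>
          rw [hh] at this hx
          simp at hx
          subst hx
          simpa using this
      have hdlen : d.length < n := by
        have := List.length_dropWhile_le (fun x => x == v) xs
        rw [← hdw] at this
        simp only [List.length_cons] at hl
        omega
      rw [hsplit, rwi_alt_run v (t.length + 1) d (by omega) hd,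
          ih d.length hdlen d rfl]
      have hrun : rwiTakeRun v (List.replicate t.length v ++ d) = ((t.length : Int), d) :=
        rwiTakeRun_run v t.length d hd
      rw [show List.replicate (t.length + 1) v ++ d = v :: (List.replicate t.length v ++ d) by
            rw [List.replicate_succ]; rfl]
      rw [show rwiAltGo 0 (v :: (List.replicate t.length v ++ d))
            = (0, v, (t.length : Int) + 1) :: rwiAltGo (0 + ((t.length : Int) + 1)) d by
            simp [rwiAltGo, hrun]]
      rw [rwiAltGo_shift d ((t.length : Int) + 1) 0]
      congr 1

-- ===== VERDICT (by name: the statement is the Claim_ definition above) =====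
theorem reduce_with_info_spec : Claim_equal_reduce_with_info := by
  intro data _
  unfold Spec_reduce_with_info
  rw [rwi_A_eq_C, rwi_B_eq_C]
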